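-- pv_equiv track=rewrite | github.com/Razi191/information-retrieval | vsm_ir.py | files_length
-- ===== SOURCE A (Python) =====
-- def files_length(inverted_index):
--     d = {}
--     c = 0
--     for word in inverted_index:
--         for record in inverted_index[word]:
--             if record not in d:
--                 d[record] = 1
--                 c = c + inverted_index[word][record].get('file_len')
--     return c
-- ===== SOURCE B (Python) =====
-- def files_length(inverted_index):
--     pairs = [(record, data.get('file_len'))
--              for recs in inverted_index.values()
--              for record, data in recs.items()]
--     return sum(dict(reversed(pairs)).values())
-- ===== Notes on version B (the rewrite author's own statement) =====
-- stated objective: alternative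
-- what changed: A's single online loop carrying a seen-dict and a running total is replaced by a flatten/index/reduce pipeline: flatten the index to (record, file_len) pairs with a comprehension, collapse to one dict via dict(reversed(pairs)) so the first occurrence of each record wins as in A, then sum the dict's values.
import Mathlib
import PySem

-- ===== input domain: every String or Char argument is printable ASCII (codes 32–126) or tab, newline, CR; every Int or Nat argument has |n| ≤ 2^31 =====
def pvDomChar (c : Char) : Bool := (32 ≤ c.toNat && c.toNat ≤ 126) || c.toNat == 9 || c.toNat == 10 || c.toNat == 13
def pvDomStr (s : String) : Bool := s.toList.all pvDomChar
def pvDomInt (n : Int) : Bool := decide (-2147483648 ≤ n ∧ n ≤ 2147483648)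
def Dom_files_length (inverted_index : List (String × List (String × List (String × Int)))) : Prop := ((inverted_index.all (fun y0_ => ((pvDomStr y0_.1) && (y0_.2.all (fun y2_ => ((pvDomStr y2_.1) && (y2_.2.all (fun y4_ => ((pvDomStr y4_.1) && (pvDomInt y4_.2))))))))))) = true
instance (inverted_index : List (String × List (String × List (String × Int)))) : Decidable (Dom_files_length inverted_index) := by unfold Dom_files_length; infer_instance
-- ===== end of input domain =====

-- B replaces A's online seen-dict/accumulator loop by: flatten to (record, file_len) pairs,
-- collapse to one dict via dict(reversed(pairs)) (so the FIRST occurrence of each record wins,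
-- as in A), and sum that dict's values — a flatten/index/reduce decomposition, same cost class.

-- ===== PORT A =====
-- Python dict arguments arrive as association lists in insertion order; A's
-- 'for word in inverted_index: … inverted_index[word]' (key iteration plus lookup in a
-- dict, whose keys are unique) is ported as iteration over the (key, value) pairs.
-- A's 'd.get("file_len")' returns None when the key is missing and 'c + None' raises
-- TypeError; the port uses getD with default 0, exact under Pre_files_length.
def files_length (inverted_index : List (String × List (String × List (String × Int)))) : Int :=
  (inverted_index.foldl
    (fun (st : PySem.Dict String Int × Int) wp =>
      wp.2.foldl
        (fun st rp =>
          if st.1.contains rp.1 = false then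
            (st.1.insert rp.1 1, st.2 + PySem.Dict.getD (PySem.Dict.mk rp.2) "file_len" 0)
          else st)
        st)
    ((PySem.Dict.empty : PySem.Dict String Int), 0)).2

-- ===== PORT B =====
def files_length_alt (inverted_index : List (String × List (String × List (String × Int)))) : Int :=
  let pairs := inverted_index.flatMap
    (fun (wp : String × List (String × List (String × Int))) => wp.2.map (fun rp => (rp.1, PySem.Dict.getD (PySem.Dict.mk rp.2) "file_len" 0)))
  (PySem.Dict.ofList pairs.reverse).values.sum

-- ===== PRECONDITION & SPEC =====
-- Pre_ excludes exactly the inputs on which Python A raises TypeError (int + None):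
-- those where the FIRST occurrence of some record (in word-then-record order, i.e. in
-- the flattened posting list) has an innermost dict lacking the key "file_len".
def Pre_files_length (inverted_index : List (String × List (String × List (String × Int)))) : Prop :=
  ∀ m (hm : m < (inverted_index.flatMap (fun (wp : String × List (String × List (String × Int))) => wp.2)).length),
    (((inverted_index.flatMap (fun (wp : String × List (String × List (String × Int))) => wp.2))[m]'hm).1
        ∈ (((inverted_index.flatMap (fun (wp : String × List (String × List (String × Int))) => wp.2)).take m).map Prod.fst) ∨
      ((inverted_index.flatMap (fun (wp : String × List (String × List (String × Int))) => wp.2))[m]'hm).2.any (fun q => q.1 == "file_len") = true)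
instance (inverted_index : List (String × List (String × List (String × Int)))) : Decidable (Pre_files_length inverted_index) := by unfold Pre_files_length; infer_instance

def pvWitness_files_length : (List (String × List (String × List (String × Int)))) :=
  [("w", [("doc1", [("file_len", 3)]), ("doc2", [("file_len", 5), ("x", 1)])]),
   ("v", [("doc1", [("file_len", 9)])])]

def Spec_files_length (inverted_index : List (String × List (String × List (String × Int)))) (out : Int) : Prop := out = files_length_alt inverted_index
instance (inverted_index : List (String × List (String × List (String × Int)))) (out : Int) : Decidable (Spec_files_length inverted_index out) := by unfold Spec_files_length; infer_instance

-- ===== CLAIM (what is proved, stated in full; the proofs are below) =====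
def Claim_equal_files_length : Prop := ∀ (inverted_index : List (String × List (String × List (String × Int)))), Dom_files_length inverted_index → Pre_files_length inverted_index → Spec_files_length inverted_index (files_length inverted_index)

-- ===== LEMMAS AND PROOFS =====

-- the common per-record value both ports extract
def pvVal (rp : String × List (String × Int)) : String × Int :=
  (rp.1, PySem.Dict.getD (PySem.Dict.mk rp.2) "file_len" 0)

-- A's loop body on an extracted (record, file_len) pair
def pvStep (st : PySem.Dict String Int × Int) (p : String × Int) : PySem.Dict String Int × Int :=
  if st.1.contains p.1 = false then (st.1.insert p.1 1, st.2 + p.2) else st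

-- first-occurrence dict built by repeated setdefault
def pvSd (e : PySem.Dict String Int) (P : List (String × Int)) : PySem.Dict String Int :=
  P.foldl (fun e p => e.setdefault p.1 p.2) e

theorem pvOfList_append (t : List (String × Int)) (p : String × Int) :
    PySem.Dict.ofList (t ++ [p]) = (PySem.Dict.ofList t).insert p.1 p.2 := by
  simp [PySem.Dict.ofList, PySem.Dict.update, List.foldl_append]

-- B's dict looks each record up to its FIRST value in the flattened pair list
theorem pvGet_ofList_reverse (P : List (String × Int)) (k : String) :
    (PySem.Dict.ofList P.reverse).get? k = P.lookup k := by
  induction P with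
  | nil => rfl
  | cons p t ih =>
    rw [List.reverse_cons, pvOfList_append, PySem.Dict.get?_insert, List.lookup, ih]
    rcases eq_or_ne k p.1 with h | h
    · simp [h]
    · rw [if_neg h, show (k == p.1) = false from beq_eq_false_iff_ne.mpr h]

theorem pvGet_pvSd (P : List (String × Int)) (e : PySem.Dict String Int) (k : String) :
    (pvSd e P).get? k = ((e.get? k).or (P.lookup k)) := by
  induction P generalizing e with
  | nil => cases h : e.get? k <;> simp [pvSd, h]
  | cons p t ih =>
    rw [pvSd, List.foldl_cons,
      show List.foldl (fun e p => e.setdefault p.1 p.2) (e.setdefault p.1 p.2) t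
        = pvSd (e.setdefault p.1 p.2) t from rfl, ih, List.lookup]
    rcases eq_or_ne k p.1 with h | h
    · subst h
      rw [PySem.Dict.get?_setdefault_self, show (p.1 == p.1) = true from beq_self_eq_true p.1]
      cases hg : e.get? p.1 <;> simp
    · rw [PySem.Dict.get?_setdefault_of_ne e p.2 h,
        show (k == p.1) = false from beq_eq_false_iff_ne.mpr h]

theorem pvNodup_pvSd (P : List (String × Int)) (e : PySem.Dict String Int) (h : e.keys.Nodup) :
    (pvSd e P).keys.Nodup := by
  induction P generalizing e with
  | nil => exact h
  | cons p t ih =>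
    rw [pvSd, List.foldl_cons]
    refine ih _ ?_
    cases hc : e.contains p.1
    · rw [PySem.Dict.setdefault_of_not_contains e p.2 hc]
      exact PySem.Dict.nodup_keys_insert e p.1 p.2 h
    · rw [PySem.Dict.setdefault_of_contains e p.2 hc]; exact h

-- A's accumulator over the flat pair list equals the value sum of the setdefault dict
theorem pvFold_eq_sum (P : List (String × Int)) (d e : PySem.Dict String Int) (c : Int)
    (hde : ∀ k, d.contains k = e.contains k) :
    (P.foldl pvStep (d, c)).2 = c + (pvSd e P).values.sum - e.values.sum := by
  induction P generalizing d e c with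
  | nil => simp [pvSd]
  | cons p t ih =>
    rw [List.foldl_cons, pvSd, List.foldl_cons,
      show List.foldl (fun e p => e.setdefault p.1 p.2) (e.setdefault p.1 p.2) t
        = pvSd (e.setdefault p.1 p.2) t from rfl]
    cases hc : d.contains p.1
    · rw [show pvStep (d, c) p = (d.insert p.1 1, c + p.2) by simp [pvStep, hc]]
      rw [PySem.Dict.setdefault_of_not_contains e p.2 (by rw [← hde]; exact hc)]
      rw [ih (d.insert p.1 1) (e.insert p.1 p.2) (c + p.2)
        (fun k => by rw [PySem.Dict.contains_insert, PySem.Dict.contains_insert, hde])]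
      have hv : (e.insert p.1 p.2).values.sum = e.values.sum + p.2 := by
        have := PySem.Dict.items_insert_of_not_contains e p.2 (by rw [← hde]; exact hc)
        simp [PySem.Dict.values, this]
      rw [hv]; ring
    · rw [show pvStep (d, c) p = (d, c) by simp [pvStep, hc]]
      rw [PySem.Dict.setdefault_of_contains e p.2 (by rw [← hde]; exact hc)]
      exact ih d e c hde

-- two dicts with unique keys and the same lookups have the same value sum
theorem pvValues_sum_eq (d1 d2 : PySem.Dict String Int)
    (h1 : d1.keys.Nodup) (h2 : d2.keys.Nodup) (h : ∀ k, d1.get? k = d2.get? k) :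
    d1.values.sum = d2.values.sum := by
  have hitems : d1.items.Perm d2.items := by
    refine (List.perm_ext_iff_of_nodup (List.Nodup.of_map _ h1) (List.Nodup.of_map _ h2)).mpr ?_
    rintro ⟨k, v⟩
    rw [← PySem.Dict.get?_eq_some_iff_mem_items d1 k v h1,
      ← PySem.Dict.get?_eq_some_iff_mem_items d2 k v h2, h]
  calc d1.values.sum = (d1.items.map (·.2)).sum := rfl
    _ = (d2.items.map (·.2)).sum := (hitems.map _).sum_eq
    _ = d2.values.sum := rfl

-- A's nested loop is the flat loop over the flattened pair list
theorem pvFlat (inv : List (String × List (String × List (String × Int))))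
    (st : PySem.Dict String Int × Int) :
    inv.foldl (fun st wp => wp.2.foldl (fun st rp => pvStep st (pvVal rp)) st) st
      = (inv.flatMap (fun (wp : String × List (String × List (String × Int))) => wp.2.map pvVal)).foldl pvStep st := by
  induction inv generalizing st with
  | nil => rfl
  | cons wp t ih => rw [List.flatMap_cons, List.foldl_append, List.foldl_map,
      List.foldl_cons, ih]

-- ===== VERDICT (by name: the statement is the Claim_ definition above) =====
theorem files_length_spec : Claim_equal_files_length := by
  intro inv _hdom _hpre
  unfold Spec_files_length files_length_alt
  show (inv.foldl (fun st wp => wp.2.foldl (fun st rp => pvStep st (pvVal rp)) st)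
      ((PySem.Dict.empty : PySem.Dict String Int), 0)).2
    = (PySem.Dict.ofList ((inv.flatMap (fun (wp : String × List (String × List (String × Int))) => wp.2.map pvVal)).reverse)).values.sum
  rw [pvFlat]
  have h := pvFold_eq_sum (inv.flatMap (fun (wp : String × List (String × List (String × Int))) => wp.2.map pvVal))
    PySem.Dict.empty PySem.Dict.empty 0 (fun _ => rfl)
  rw [h]
  have hsum := pvValues_sum_eq
    (PySem.Dict.ofList ((inv.flatMap (fun (wp : String × List (String × List (String × Int))) => wp.2.map pvVal)).reverse))
    (pvSd PySem.Dict.empty (inv.flatMap (fun (wp : String × List (String × List (String × Int))) => wp.2.map pvVal)))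
    (PySem.Dict.nodup_keys_ofList _)
    (pvNodup_pvSd _ PySem.Dict.empty List.nodup_nil)
    (fun k => by rw [pvGet_ofList_reverse, pvGet_pvSd]; rfl)
  rw [hsum]
  show 0 + _ - (0 : Int) = _
  ring
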